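-- pv_equiv track=rewrite | github.com/mjennings924/algorithms | arrays/longest_word.py | easy_longest_word
-- ===== SOURCE A (Python) =====
-- def easy_longest_word(string):
--     count = 0
--     maximum = 0
--     for char in string:
--         if char.isalnum():
--             count += 1
--         else:
--             maximum = max(maximum, count)
--             count = 0
--     maximum = max(maximum, count)
--     return maximum
-- ===== SOURCE B (Python) =====
-- def easy_longest_word(string):
--     if string == "":
--         return 0
--     i = 0
--     while i < len(string) and string[i].isalnum():
--         i += 1
--     return max(i, easy_longest_word(string[i + 1:]))
-- ===== Notes on version B (the rewrite author's own statement) =====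
-- stated objective: alternative
-- what changed: Replaced the single-pass two-accumulator (count/maximum) loop by recursion on maximal alphanumeric runs: measure the leading run, skip one separator, recurse on the rest and take the max.
import Mathlib
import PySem

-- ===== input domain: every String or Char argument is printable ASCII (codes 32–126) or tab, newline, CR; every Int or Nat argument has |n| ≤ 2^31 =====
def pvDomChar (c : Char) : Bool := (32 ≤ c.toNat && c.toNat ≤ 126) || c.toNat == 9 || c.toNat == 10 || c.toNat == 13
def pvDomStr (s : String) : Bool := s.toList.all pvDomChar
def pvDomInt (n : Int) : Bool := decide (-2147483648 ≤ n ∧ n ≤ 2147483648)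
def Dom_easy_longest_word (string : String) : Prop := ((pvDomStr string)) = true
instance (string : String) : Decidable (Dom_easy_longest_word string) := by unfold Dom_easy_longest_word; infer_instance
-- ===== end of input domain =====

-- B replaces A's single-pass count/maximum accumulator loop by recursion on maximal
-- alphanumeric runs (measure the leading run, skip one separator, recurse): 'alternative'.

-- ===== PORT A =====
def easy_longest_word (string : String) : Int :=
  let r := string.toList.foldl
    (fun (cm : Int × Int) char =>
      if PySem.Chars.isalnum char then (cm.1 + 1, cm.2) else ((0 : Int), max cm.2 cm.1))
    ((0 : Int), (0 : Int))
  max r.2 r.1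

-- ===== PORT B =====
-- the `while i < len(string) and string[i].isalnum(): i += 1` loop: length of the leading run
def altRunLen : List Char → Nat
  | [] => 0
  | c :: cs => if PySem.Chars.isalnum c then altRunLen cs + 1 else 0

-- recursive body of Source B; `string[i+1:]` with i+1 ≥ 0 is exactly `List.drop (i+1)` (slice_from)
def altGo : List Char → Int
  | [] => 0
  | c :: cs =>
    let i := altRunLen (c :: cs)
    max (i : Int) (altGo ((c :: cs).drop (i + 1)))
termination_by l => l.length
decreasing_by simp [List.length_drop]

def easy_longest_word_alt (string : String) : Int := altGo string.toList

-- ===== PRECONDITION & SPEC =====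
def Spec_easy_longest_word (string : String) (out : Int) : Prop := out = easy_longest_word_alt string
instance (string : String) (out : Int) : Decidable (Spec_easy_longest_word string out) := by unfold Spec_easy_longest_word; infer_instance

-- ===== CLAIM (what is proved, stated in full; the proofs are below) =====
def Claim_equal_easy_longest_word : Prop := ∀ (string : String), Dom_easy_longest_word string → Spec_easy_longest_word string (easy_longest_word string)

-- ===== LEMMAS AND PROOFS =====

theorem altGo_nil : altGo [] = 0 := by rw [altGo]

theorem altGo_run (l : List Char) :
    altGo l = max (altRunLen l : Int) (altGo (l.drop (altRunLen l + 1))) := by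
  cases l with
  | nil => simp [altGo_nil, altRunLen]
  | cons c cs => rw [altGo]

theorem altGo_nonneg (l : List Char) : 0 ≤ altGo l := by
  cases l with
  | nil => simp [altGo_nil]
  | cons c cs =>
    rw [altGo]
    exact le_trans (Int.natCast_nonneg _) (le_max_left _ _)

theorem foldA_key (l : List Char) : ∀ (count maximum : Int), 0 ≤ count →
    (let r := l.foldl
      (fun (cm : Int × Int) char =>
        if PySem.Chars.isalnum char then (cm.1 + 1, cm.2) else ((0 : Int), max cm.2 cm.1))
      (count, maximum)
     max r.2 r.1)
    = max maximum (max (count + (altRunLen l : Int)) (altGo (l.drop (altRunLen l + 1)))) := by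
  induction l with
  | nil =>
    intro count maximum hc
    simp [altRunLen, altGo_nil]
    omega
  | cons c cs ih =>
    intro count maximum hc
    by_cases h : PySem.Chars.isalnum c = true
    · simp only [List.foldl_cons, h, if_pos, altRunLen]
      rw [ih (count + 1) maximum (by omega)]
      rw [show (c :: cs).drop (altRunLen cs + 1 + 1) = cs.drop (altRunLen cs + 1) from by
        simp [List.drop]]
      push_cast
      omega
    · simp only [List.foldl_cons, h, if_neg, Bool.not_eq_true, altRunLen]
      rw [ih 0 (max maximum count) (le_refl 0)]
      simp only [Nat.cast_zero, List.drop_succ_cons, List.drop_zero, zero_add, add_zero]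
      rw [← altGo_run cs]
      omega

-- ===== VERDICT (by name: the statement is the Claim_ definition above) =====
theorem easy_longest_word_spec : Claim_equal_easy_longest_word := by
  intro s _
  unfold Spec_easy_longest_word easy_longest_word easy_longest_word_alt
  rw [foldA_key s.toList 0 0 (le_refl 0)]
  simp only [zero_add]
  rw [← altGo_run]
  have := altGo_nonneg s.toList
  omega
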